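-- pv_equiv track=rewrite | github.com/mattdoug604/Rosalind | 2_bioinformatics_stronghold/TREE_CompletingATree.py | completeNodes
-- ===== SOURCE A (Python) =====
-- def completeNodes(n, adj_list):
--     ''' Taking an adjacency list and a known number of nodes, fill in the
--         gaps (i.e. add the nodes currently without edges to the list).
--     '''
--     check_list = [x for x in range(1, n+1)]
--
--     ''' "Check off" the nodes that are in the adjacency list. '''
--     for a, b in adj_list.items():
--         if a in check_list:
--             check_list.remove(a)
--         if b in check_list:
--             check_list.remove(b)
--
--     ''' Fill in the adjacency list with the remaining (missing) nodes. '''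
--     for i in check_list:
--         adj_list[i] = None
--
--     return(adj_list)
-- ===== SOURCE B (Python) =====
-- def completeNodes(n, adj_list):
--     ''' Additive re-implementation: collect every node already mentioned
--         (keys and non-None values) into one set, then fill in the missing
--         nodes in a single membership-gated pass over range(1, n+1). '''
--     present = set(adj_list) | {b for b in adj_list.values() if b is not None}
--     for i in range(1, n + 1):
--         if i not in present:
--             adj_list[i] = None
--     return adj_list
-- ===== Notes on version B (the rewrite author's own statement) =====
-- stated objective: simpler
-- what changed: B replaces A's subtractive scheme (build the full list 1..n, scan it and list.remove each mentioned node, then append the leftovers) by one additive pass: build the set of mentioned nodes once from keys and non-None values, then insert every i in range(1,n+1) that is not in the set.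
import Mathlib
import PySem

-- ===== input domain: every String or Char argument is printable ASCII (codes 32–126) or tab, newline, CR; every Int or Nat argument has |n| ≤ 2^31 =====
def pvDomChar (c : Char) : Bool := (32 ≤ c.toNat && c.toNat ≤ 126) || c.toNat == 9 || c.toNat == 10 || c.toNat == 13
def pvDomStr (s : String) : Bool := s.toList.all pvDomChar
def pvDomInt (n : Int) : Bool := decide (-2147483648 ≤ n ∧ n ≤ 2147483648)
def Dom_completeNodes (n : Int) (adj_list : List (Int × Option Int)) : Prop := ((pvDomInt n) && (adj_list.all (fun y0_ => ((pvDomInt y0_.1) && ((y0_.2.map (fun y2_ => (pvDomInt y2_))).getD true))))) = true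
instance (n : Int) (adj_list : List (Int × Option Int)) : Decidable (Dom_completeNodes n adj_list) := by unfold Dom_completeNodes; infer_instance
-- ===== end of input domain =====

-- B builds the set of mentioned nodes once and adds the absent nodes in one additive pass,
-- instead of A's subtractive removal from a full check list (asymptotically fewer list scans).
-- A mutates its dict argument in place; equivalence proved here is about the returned dict value.

-- ===== PORT A =====
def completeNodes (n : Int) (adj_list : List (Int × Option Int)) : List (Int × Option Int) :=
  -- check_list = [x for x in range(1, n+1)]
  let check0 : List Int := PySem.List.pyRange 1 (n + 1) 1
  -- for a, b in adj_list.items(): if a in check_list: remove(a); if b in check_list: remove(b)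
  -- ('b in check_list' with b = None is False: the list holds ints)
  let check : List Int := adj_list.foldl (fun cl p =>
    let cl1 := if cl.contains p.1 then (PySem.List.remove? cl p.1).getD cl else cl
    match p.2 with
    | some b => if cl1.contains b then (PySem.List.remove? cl1 b).getD cl1 else cl1
    | none => cl1) check0
  -- for i in check_list: adj_list[i] = None; return adj_list
  (check.foldl (fun d i => PySem.Dict.insert d i none) (PySem.Dict.mk adj_list)).items

-- ===== PORT B =====
def completeNodes_alt (n : Int) (adj_list : List (Int × Option Int)) : List (Int × Option Int) :=
  -- present = set(adj_list) | {b for b in adj_list.values() if b is not None}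
  let present : PySem.Set Int :=
    PySem.Set.union (PySem.Set.ofList (adj_list.map Prod.fst)) (adj_list.filterMap Prod.snd)
  -- for i in range(1, n+1): if i not in present: adj_list[i] = None; return adj_list
  ((PySem.List.pyRange 1 (n + 1) 1).foldl
    (fun d i => if !(PySem.Set.contains present i) then PySem.Dict.insert d i none else d)
    (PySem.Dict.mk adj_list)).items

-- ===== PRECONDITION & SPEC =====
def Spec_completeNodes (n : Int) (adj_list : List (Int × Option Int)) (out : List (Int × Option Int)) : Prop := out = completeNodes_alt n adj_list
instance (n : Int) (adj_list : List (Int × Option Int)) (out : List (Int × Option Int)) : Decidable (Spec_completeNodes n adj_list out) := by unfold Spec_completeNodes; infer_instance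

-- ===== CLAIM (what is proved, stated in full; the proofs are below) =====
def Claim_equal_completeNodes : Prop := ∀ (n : Int) (adj_list : List (Int × Option Int)), Dom_completeNodes n adj_list → Spec_completeNodes n adj_list (completeNodes n adj_list)

-- ===== LEMMAS AND PROOFS =====

-- conditional list.remove on a duplicate-free list is a filter
lemma condRemove_eq_filter (cl : List Int) (a : Int) (h : cl.Nodup) :
    (if cl.contains a then (PySem.List.remove? cl a).getD cl else cl)
      = cl.filter (fun x => x ≠ a) := by
  by_cases ha : a ∈ cl
  · rw [if_pos (by simpa using ha), PySem.List.remove?_eq_some_erase cl a ha]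
    simpa using h.erase_eq_filter a
  · rw [if_neg (by simpa using ha), eq_comm, List.filter_eq_self]
    intro x hx
    simp only [ne_eq, decide_eq_true_eq]
    rintro rfl; exact ha hx

-- A's "check off" loop computes a filter of the initial check list
lemma loopA_eq_filter (l : List (Int × Option Int)) (cl : List Int) (h : cl.Nodup) :
    l.foldl (fun cl p =>
      let cl1 := if cl.contains p.1 then (PySem.List.remove? cl p.1).getD cl else cl
      match p.2 with
      | some b => if cl1.contains b then (PySem.List.remove? cl1 b).getD cl1 else cl1
      | none => cl1) cl
    = cl.filter (fun x =>
        !((l.map Prod.fst).contains x || (l.filterMap Prod.snd).contains x)) := by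
  induction l generalizing cl with
  | nil => simp
  | cons p l ih =>
    obtain ⟨a, b⟩ := p
    rw [List.foldl_cons]
    cases b with
    | none =>
      simp only [condRemove_eq_filter cl a h]
      rw [ih _ (h.filter _), List.filter_filter]
      apply List.filter_congr
      intro x _
      simp only [List.map_cons, List.filterMap_cons_none, List.contains_cons]
      rcases eq_or_ne x a with rfl | hxa
      · simp_all
      · have ha' : (x == a) = false := by simpa using hxa
        simp [ha']
        exact fun _ _ => hxa
    | some v =>
      simp only [condRemove_eq_filter cl a h,
        condRemove_eq_filter (cl.filter (fun x => x ≠ a)) v (h.filter _)]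
      rw [ih _ ((h.filter _).filter _), List.filter_filter, List.filter_filter]
      apply List.filter_congr
      intro x _
      simp only [List.map_cons, List.contains_cons]
      rcases eq_or_ne x a with rfl | hxa
      · simp_all
      · rcases eq_or_ne x v with rfl | hxv
        · simp_all
        · have ha' : (x == a) = false := by simpa using hxa
          have hv' : (x == v) = false := by simpa using hxv
          simp [ha', hv', hxa, hxv]
    
-- membership in B's 'present' set, as a Bool on the raw lists
lemma contains_present (l : List (Int × Option Int)) (x : Int) :
    PySem.Set.contains
        (PySem.Set.union (PySem.Set.ofList (l.map Prod.fst)) (l.filterMap Prod.snd)) x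
      = ((l.map Prod.fst).contains x || (l.filterMap Prod.snd).contains x) := by
  simp only [PySem.Set.contains_eq_listContains]
  rcases Bool.eq_false_or_eq_true (((l.map Prod.fst).contains x || (l.filterMap Prod.snd).contains x)) with hb | hb <;>
    rw [hb] <;> simp_all [PySem.Set.mem_union, PySem.Set.mem_ofList]

-- ===== VERDICT (by name: the statement is the Claim_ definition above) =====
theorem completeNodes_spec : Claim_equal_completeNodes := by
  intro n adj_list _
  unfold Spec_completeNodes
  simp only [completeNodes, completeNodes_alt]
  rw [PySem.List.foldl_if_eq_foldl_filter,
      loopA_eq_filter adj_list _ (PySem.List.nodup_pyRange_one 1 (n + 1))]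
  congr 2
  apply List.filter_congr
  intro x _
  rw [contains_present]
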